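-- pv_equiv track=rewrite | github.com/vinayswamik/wisq | src/wisq/sarouting.py | criticality
-- ===== SOURCE A (Python) =====
-- def criticality(step, remaining_gates, crit_dict):
--     paths = 0
--     for id,qubits,path in step:
--         dependent = get_dependent_gates((id,qubits), remaining_gates)
--         depths = get_depth_by_qubit(dependent)
--         crit_path = max(depths.get(q,0) for q in depths.keys())
--         paths += 1+crit_path
--     return paths
--
-- def get_depth_by_qubit(gates):
--     depth_by_qubit = {}
--     for i in gates:
--         qubits = gates[i]
--         depths = (depth_by_qubit.get(q,  0) for q in qubits)
--         max_depth = max(depths)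
--         for qubit in qubits:
--             depth_by_qubit[qubit] = 1 + max_depth
--     return depth_by_qubit
--
-- def get_dependent_gates(gate_tuple, remaining):
--     id, initial_gate = gate_tuple
--     dependent = {}
--     dependent[id] = initial_gate
--     for id,gate in remaining.items():
--
--         if any(depends_on((id,gate), added) for added in dependent.items()):
--             dependent[id] = gate
--
--     return dependent
--
-- def depends_on(g1, g2):
--     return g1[0] > g2[0] and len(set(g1[1]).intersection(g2[1])) > 0
-- ===== SOURCE B (Python) =====
-- def criticality(step, remaining_gates, crit_dict):
--     # One pass per step gate: a per-qubit minimal-dependent-id map replaces the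
--     # scan over all previously added gates, and depth/critical-path are updated
--     # on the fly instead of in separate passes.
--     items = list(remaining_gates.items())
--     total = 0
--     for gate_id, qubits, _path in step:
--         min_id = {q: gate_id for q in qubits}
--         depth = {q: 1 for q in qubits}
--         best = 1
--         for gid, qs in items:
--             if any(q in min_id and min_id[q] < gid for q in qs):
--                 cur = 1 + max(depth.get(q, 0) for q in qs)
--                 for q in qs:
--                     depth[q] = cur
--                     min_id[q] = min(min_id.get(q, gid), gid)
--                 if cur > best:
--                     best = cur
--         total += 1 + best
--     return total
-- ===== Notes on version B (the rewrite author's own statement) =====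
-- stated objective: faster
-- what changed: Instead of re-scanning all previously added dependent gates for every remaining gate and then running two separate passes (depth dict, then max over it), B keeps a per-qubit minimal-dependent-id map and a per-qubit depth map and decides membership, updates depths and tracks the critical path in a single pass over the remaining gates.
import Mathlib
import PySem

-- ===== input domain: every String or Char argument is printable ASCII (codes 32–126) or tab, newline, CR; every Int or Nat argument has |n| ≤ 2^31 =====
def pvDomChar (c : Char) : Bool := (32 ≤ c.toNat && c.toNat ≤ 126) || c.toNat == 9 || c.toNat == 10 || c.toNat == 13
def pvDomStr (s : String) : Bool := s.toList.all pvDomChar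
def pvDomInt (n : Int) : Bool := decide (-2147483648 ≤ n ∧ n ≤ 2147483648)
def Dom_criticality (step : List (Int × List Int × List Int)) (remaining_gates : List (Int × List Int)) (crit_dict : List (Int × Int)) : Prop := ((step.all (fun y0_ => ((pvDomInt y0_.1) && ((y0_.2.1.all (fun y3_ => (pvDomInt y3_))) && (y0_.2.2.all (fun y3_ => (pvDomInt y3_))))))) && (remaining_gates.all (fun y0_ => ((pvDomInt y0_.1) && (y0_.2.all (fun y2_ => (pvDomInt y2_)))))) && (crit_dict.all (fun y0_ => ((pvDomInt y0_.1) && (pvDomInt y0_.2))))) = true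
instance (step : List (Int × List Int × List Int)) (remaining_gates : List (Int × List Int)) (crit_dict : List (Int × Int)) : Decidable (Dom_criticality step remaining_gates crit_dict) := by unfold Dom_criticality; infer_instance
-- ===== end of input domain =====

-- B replaces A's quadratic scan over all previously added dependent gates by a per-qubit
-- minimal-dependent-id map and fuses the dependency, depth and critical-path passes into one
-- loop over the remaining gates (objective: faster; return value only, no argument is mutated).

-- ===== PORT A =====
def pyDependsOn (g1 g2 : Int × List Int) : Bool :=
  decide (g2.1 < g1.1) && decide (0 < PySem.Set.len (PySem.Set.inter (PySem.Set.ofList g1.2) g2.2))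

-- loop body of get_dependent_gates (named so the proofs can speak about it)
def depStepFn (dependent : PySem.Dict Int (List Int)) (p : Int × List Int) : PySem.Dict Int (List Int) :=
  if dependent.items.any (fun added => pyDependsOn p added) then dependent.insert p.1 p.2
  else dependent

def pyGetDependentGates (gt : Int × List Int) (remaining : PySem.Dict Int (List Int)) : PySem.Dict Int (List Int) :=
  remaining.items.foldl depStepFn (PySem.Dict.empty.insert gt.1 gt.2)

-- max(<generator of ints>); Python raises ValueError on an empty sequence — unreachable under Pre_
def pyMaxGen (xs : List Int) : Int := (PySem.List.max? xs (fun y => y)).getD 0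

-- loop body of get_depth_by_qubit
def depthStepFn (d : PySem.Dict Int Int) (p : Int × List Int) : PySem.Dict Int Int :=
  let maxDepth := pyMaxGen (p.2.map (fun q => d.getD q 0))
  p.2.foldl (fun d q => d.insert q (1 + maxDepth)) d

def pyGetDepthByQubit (gates : PySem.Dict Int (List Int)) : PySem.Dict Int Int :=
  gates.items.foldl depthStepFn PySem.Dict.empty

def criticality (step : List (Int × List Int × List Int)) (remaining_gates : List (Int × List Int)) (crit_dict : List (Int × Int)) : Int :=
  step.foldl
    (fun paths g =>
      let dependent := pyGetDependentGates (g.1, g.2.1) (PySem.Dict.ofList remaining_gates)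
      let depths := pyGetDepthByQubit dependent
      let critPath := pyMaxGen (depths.keys.map (fun q => depths.getD q 0))
      paths + (1 + critPath))
    0

-- ===== PORT B =====
-- inner loop body of Source B: state (min_id, depth, best)
def altInner (s : PySem.Dict Int Int × PySem.Dict Int Int × Int) (p : Int × List Int) :
    PySem.Dict Int Int × PySem.Dict Int Int × Int :=
  if p.2.any (fun q => s.1.contains q && decide (s.1.getD q 0 < p.1)) then
    let cur := 1 + (PySem.List.max? (p.2.map (fun q => s.2.1.getD q 0)) (fun y => y)).getD 0
    let dm := p.2.foldl
      (fun (dm : PySem.Dict Int Int × PySem.Dict Int Int) q =>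
        (dm.1.insert q cur, dm.2.insert q (min (dm.2.getD q p.1) p.1)))
      (s.2.1, s.1)
    (dm.2, dm.1, if s.2.2 < cur then cur else s.2.2)
  else s

def criticality_alt (step : List (Int × List Int × List Int)) (remaining_gates : List (Int × List Int)) (crit_dict : List (Int × Int)) : Int :=
  let items := (PySem.Dict.ofList remaining_gates).items
  step.foldl
    (fun total g =>
      let s := items.foldl altInner
        (PySem.Dict.ofList (g.2.1.map (fun q => (q, g.1))),
         PySem.Dict.ofList (g.2.1.map (fun q => (q, (1 : Int)))), 1)
      total + (1 + s.2.2))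
    0

-- ===== PRECONDITION & SPEC =====
-- Pre_ excludes exactly the inputs where A raises: a step gate with an empty qubit list
-- makes max() in get_depth_by_qubit raise ValueError.
def Pre_criticality (step : List (Int × List Int × List Int)) (remaining_gates : List (Int × List Int)) (crit_dict : List (Int × Int)) : Prop :=
  ∀ g ∈ step, g.2.1 ≠ []
instance (step : List (Int × List Int × List Int)) (remaining_gates : List (Int × List Int)) (crit_dict : List (Int × Int)) : Decidable (Pre_criticality step remaining_gates crit_dict) := by unfold Pre_criticality; infer_instance

def pvWitness_criticality : (List (Int × List Int × List Int)) × (List (Int × List Int)) × (List (Int × Int)) :=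
  ([(0, [0], [])], [(1, [0]), (2, [0, 1])], [])

def Spec_criticality (step : List (Int × List Int × List Int)) (remaining_gates : List (Int × List Int)) (crit_dict : List (Int × Int)) (out : Int) : Prop := out = criticality_alt step remaining_gates crit_dict
instance (step : List (Int × List Int × List Int)) (remaining_gates : List (Int × List Int)) (crit_dict : List (Int × Int)) (out : Int) : Decidable (Spec_criticality step remaining_gates crit_dict out) := by unfold Spec_criticality; infer_instance

-- ===== CLAIM (what is proved, stated in full; the proofs are below) =====
def Claim_equal_criticality : Prop := ∀ (step : List (Int × List Int × List Int)) (remaining_gates : List (Int × List Int)) (crit_dict : List (Int × Int)), Dom_criticality step remaining_gates crit_dict → Pre_criticality step remaining_gates crit_dict → Spec_criticality step remaining_gates crit_dict (criticality step remaining_gates crit_dict)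

-- ===== LEMMAS AND PROOFS =====

-- minimal id of a dependent gate acting on qubit q (none if no such gate)
def minSpec (G : List (Int × List Int)) (q : Int) : Option Int :=
  PySem.List.min? ((G.filter (fun p => decide (q ∈ p.2))).map Prod.fst) (fun y => y)

-- A's crit_path expression: max over the depth dict's values
def critOf (d : PySem.Dict Int Int) : Int := pyMaxGen (d.keys.map (fun q => d.getD q 0))

lemma maxgen_ge {l : List Int} {x : Int} (h : x ∈ l) : x ≤ pyMaxGen l := by
  unfold pyMaxGen
  cases hm : PySem.List.max? l (fun y => y) with
  | none => exact absurd ((PySem.List.max?_eq_none_iff l _).mp hm ▸ h) (List.not_mem_nil)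
  | some m => simpa using PySem.List.max?_isMax hm x h

lemma maxgen_le {l : List Int} {b : Int} (hb : 0 ≤ b) (h : ∀ x ∈ l, x ≤ b) : pyMaxGen l ≤ b := by
  unfold pyMaxGen
  cases hm : PySem.List.max? l (fun y => y) with
  | none => simpa using hb
  | some m => simpa using h m (PySem.List.max?_mem hm)

lemma minSpec_lt_iff (G : List (Int × List Int)) (q n : Int) :
    (∃ m, minSpec G q = some m ∧ m < n) ↔ ∃ p ∈ G, q ∈ p.2 ∧ p.1 < n := by
  unfold minSpec
  constructor
  · rintro ⟨m, hm, hlt⟩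
    have := PySem.List.min?_mem hm
    simp only [List.mem_map, List.mem_filter] at this
    obtain ⟨p, ⟨hpG, hq⟩, hfst⟩ := this
    exact ⟨p, hpG, by simpa using hq, by omega⟩
  · rintro ⟨p, hpG, hq, hlt⟩
    have hmem : p.1 ∈ (G.filter (fun p => decide (q ∈ p.2))).map Prod.fst := by
      simp only [List.mem_map, List.mem_filter]
      exact ⟨p, ⟨hpG, by simpa using hq⟩, rfl⟩
    cases hm : PySem.List.min? ((G.filter (fun p => decide (q ∈ p.2))).map Prod.fst) (fun y => y) with
    | none =>
      rw [PySem.List.min?_eq_none_iff] at hm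
      rw [hm] at hmem; exact absurd hmem (List.not_mem_nil)
    | some m =>
      have := PySem.List.min?_isMin hm _ hmem
      exact ⟨m, rfl, by omega⟩

lemma get?_fic (qs : List Int) (v : Int) : ∀ (d : PySem.Dict Int Int) (x : Int),
    (qs.foldl (fun d q => d.insert q v) d).get? x = if x ∈ qs then some v else d.get? x := by
  induction qs with
  | nil => simp
  | cons a t ih =>
    intro d x
    
    rw [List.foldl_cons, ih]
    by_cases hxt : x ∈ t
    · simp [hxt]
    · by_cases hxa : x = a
      · simp [hxa]
      · simp [hxt, hxa, PySem.Dict.get?_insert]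

lemma getD_fic (qs : List Int) (v : Int) (d : PySem.Dict Int Int) (x : Int) :
    (qs.foldl (fun d q => d.insert q v) d).getD x 0 = if x ∈ qs then v else d.getD x 0 := by
  rw [PySem.Dict.getD_eq_get?_getD, get?_fic]
  split
  · rfl
  · rw [PySem.Dict.getD_eq_get?_getD]

lemma contains_fic_iff (qs : List Int) (v : Int) (d : PySem.Dict Int Int) (x : Int) :
    (qs.foldl (fun d q => d.insert q v) d).contains x = true ↔ x ∈ d.keys ∨ x ∈ qs := by
  rw [PySem.Dict.contains_iff_mem_keys,
    PySem.Dict.keys_foldl_insert qs (fun _ _ => v) d, PySem.Set.mem_update]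

lemma get?_fim (qs : List Int) (n : Int) : ∀ (d : PySem.Dict Int Int) (x : Int),
    (qs.foldl (fun d q => d.insert q (min (d.getD q n) n)) d).get? x
      = if x ∈ qs then some (min ((d.get? x).getD n) n) else d.get? x := by
  induction qs with
  | nil => simp
  | cons a t ih =>
    intro d x
    rw [List.foldl_cons, ih]
    by_cases hxt : x ∈ t
    · by_cases hxa : x = a
      · subst hxa
        simp only [hxt, if_pos (List.mem_cons_self), if_pos]
        rw [PySem.Dict.get?_insert]
        simp [PySem.Dict.getD_eq_get?_getD]
      · simp [hxt, hxa, PySem.Dict.get?_insert]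
    · by_cases hxa : x = a
      · subst hxa
        simp [hxt, PySem.Dict.getD_eq_get?_getD]
      · simp [hxt, hxa, PySem.Dict.get?_insert]

lemma contains_lt_iff (minid : PySem.Dict Int Int) (q n : Int) :
    (minid.contains q && decide (minid.getD q 0 < n)) = true ↔ ∃ m, minid.get? q = some m ∧ m < n := by
  cases hq : minid.get? q with
  | none =>
    have hc : minid.contains q = false := by
      rw [PySem.Dict.contains_eq_isSome_get?, hq]; rfl
    simp [hc]
  | some m =>
    have hc : minid.contains q = true := by
      rw [PySem.Dict.contains_eq_isSome_get?, hq]; rfl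
    have hd : minid.getD q 0 = m := by rw [PySem.Dict.getD_eq_get?_getD, hq]; rfl
    simp [hc, hd]

lemma pyDependsOn_iff (p a : Int × List Int) :
    pyDependsOn p a = true ↔ a.1 < p.1 ∧ ∃ q ∈ p.2, q ∈ a.2 := by
  unfold pyDependsOn
  simp only [Bool.and_eq_true, decide_eq_true_eq, PySem.Set.len]
  constructor
  · rintro ⟨h1, h2⟩
    refine ⟨h1, ?_⟩
    have : 0 < (PySem.Set.inter (PySem.Set.ofList p.2) a.2).length := by exact_mod_cast h2
    obtain ⟨y, hy⟩ := List.exists_mem_of_length_pos this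
    rw [PySem.Set.mem_inter] at hy
    exact ⟨y, (PySem.Set.mem_ofList _ _).mp hy.1, hy.2⟩
  · rintro ⟨h1, q, hq1, hq2⟩
    refine ⟨h1, ?_⟩
    have : q ∈ PySem.Set.inter (PySem.Set.ofList p.2) a.2 :=
      (PySem.Set.mem_inter _ _ _).mpr ⟨(PySem.Set.mem_ofList _ _).mpr hq1, hq2⟩
    have := List.length_pos_of_mem this
    exact_mod_cast this

lemma cond_eq (G : List (Int × List Int)) (minid : PySem.Dict Int Int) (p : Int × List Int)
    (hm : ∀ q, minid.get? q = minSpec G q) :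
    (p.2.any (fun q => minid.contains q && decide (minid.getD q 0 < p.1)))
      = (G.any (fun added => pyDependsOn p added)) := by
  apply Bool.eq_iff_iff.mpr
  simp only [List.any_eq_true]
  constructor
  · rintro ⟨q, hq, hcl⟩
    rw [contains_lt_iff] at hcl
    rw [hm q] at hcl
    obtain ⟨a, haG, hqa, hlt⟩ := (minSpec_lt_iff G q p.1).mp hcl
    exact ⟨a, haG, (pyDependsOn_iff p a).mpr ⟨hlt, q, hq, hqa⟩⟩
  · rintro ⟨a, haG, hda⟩
    obtain ⟨hlt, q, hq, hqa⟩ := (pyDependsOn_iff p a).mp hda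
    refine ⟨q, hq, ?_⟩
    rw [contains_lt_iff, hm q]
    exact (minSpec_lt_iff G q p.1).mpr ⟨a, haG, hqa, hlt⟩

lemma min?_append_singleton (l : List Int) (x : Int) :
    PySem.List.min? (l ++ [x]) (fun y => y)
      = some (min ((PySem.List.min? l (fun y => y)).getD x) x) := by
  cases l with
  | nil => simp [PySem.List.min?]
  | cons a t =>
    rw [List.cons_append, PySem.List.min?_id_cons, PySem.List.min?_id_cons,
      List.foldl_append]
    simp

lemma minSpec_append (G : List (Int × List Int)) (p : Int × List Int) (q : Int) :
    minSpec (G ++ [p]) q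
      = if q ∈ p.2 then some (min ((minSpec G q).getD p.1) p.1) else minSpec G q := by
  unfold minSpec
  rw [List.filter_append, List.map_append]
  by_cases hq : q ∈ p.2
  · simp only [hq, decide_true, if_true, List.filter_cons, List.filter_nil,
      List.map_cons, List.map_nil]
    exact min?_append_singleton _ _
  · simp [hq]

lemma minSpec_single (i0 : Int) (qs : List Int) (q : Int) :
    minSpec [(i0, qs)] q = if q ∈ qs then some i0 else none := by
  unfold minSpec
  by_cases hq : q ∈ qs
  · simp [hq, PySem.List.min?_id_cons]
  · simp [hq, PySem.List.min?]

lemma get?_ofList_const (qs : List Int) (v x : Int) :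
    (PySem.Dict.ofList (qs.map (fun q => (q, v)))).get? x = if x ∈ qs then some v else none := by
  show (List.foldl (fun acc p => acc.insert p.1 p.2) PySem.Dict.empty (qs.map (fun q => (q, v)))).get? x = _
  rw [List.foldl_map, get?_fic]
  simp [PySem.Dict.get?_empty]

lemma getD0_nonneg (d : PySem.Dict Int Int)
    (hval : ∀ q, d.contains q = true → 1 ≤ d.getD q 0) (q : Int) : 0 ≤ d.getD q 0 := by
  cases hc : d.contains q with
  | false => rw [PySem.Dict.getD_of_not_contains d 0 hc]
  | true => have := hval q hc; omega

lemma keys_depthStep (d : PySem.Dict Int Int) (p : Int × List Int) (x : Int) :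
    x ∈ (depthStepFn d p).keys ↔ x ∈ d.keys ∨ x ∈ p.2 := by
  unfold depthStepFn
  rw [← PySem.Dict.contains_iff_mem_keys]
  exact contains_fic_iff _ _ _ _

lemma getD_depthStep (d : PySem.Dict Int Int) (p : Int × List Int) (x : Int) :
    (depthStepFn d p).getD x 0
      = if x ∈ p.2 then 1 + pyMaxGen (p.2.map (fun q => d.getD q 0)) else d.getD x 0 := by
  unfold depthStepFn
  exact getD_fic _ _ _ _

lemma critOf_depthStep (d : PySem.Dict Int Int) (p : Int × List Int)
    (hne : p.2 ≠ [])
    (hval : ∀ q, d.contains q = true → 1 ≤ d.getD q 0) :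
    critOf (depthStepFn d p) = max (critOf d) (1 + pyMaxGen (p.2.map (fun q => d.getD q 0))) := by
  set c : Int := 1 + pyMaxGen (p.2.map (fun q => d.getD q 0)) with hc
  obtain ⟨q0, hq0⟩ := List.exists_mem_of_ne_nil _ hne
  have hmg0 : 0 ≤ pyMaxGen (p.2.map (fun q => d.getD q 0)) := by
    have h1 : d.getD q0 0 ≤ pyMaxGen (p.2.map (fun q => d.getD q 0)) :=
      maxgen_ge (List.mem_map_of_mem hq0)
    have := getD0_nonneg d hval q0
    omega
  have hc1 : 1 ≤ c := by omega
  have hclec : ∀ x ∈ p.2, d.getD x 0 ≤ c := by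
    intro x hx
    have : d.getD x 0 ≤ pyMaxGen (p.2.map (fun q => d.getD q 0)) :=
      maxgen_ge (List.mem_map_of_mem hx)
    omega
  -- c is attained in the new dict
  have hcmem : c ≤ critOf (depthStepFn d p) := by
    have hk : q0 ∈ (depthStepFn d p).keys := (keys_depthStep d p q0).mpr (Or.inr hq0)
    have hv : (depthStepFn d p).getD q0 0 = c := by rw [getD_depthStep, if_pos hq0]
    have := maxgen_ge (l := (depthStepFn d p).keys.map (fun q => (depthStepFn d p).getD q 0))
      (x := (depthStepFn d p).getD q0 0) (List.mem_map_of_mem hk)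
    rw [hv] at this
    exact this
  have hA : critOf d ≤ critOf (depthStepFn d p) := by
    apply maxgen_le (by omega)
    intro y hy
    simp only [List.mem_map] at hy
    obtain ⟨x, hxk, rfl⟩ := hy
    have hk' : x ∈ (depthStepFn d p).keys := (keys_depthStep d p x).mpr (Or.inl hxk)
    have hle : d.getD x 0 ≤ (depthStepFn d p).getD x 0 := by
      rw [getD_depthStep]
      split
      · rename_i hxp
        exact le_trans (hclec x hxp) (le_refl c)
      · exact le_refl _
    exact le_trans hle (maxgen_ge (List.mem_map_of_mem hk'))
  have hup : critOf (depthStepFn d p) ≤ max (critOf d) c := by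
    apply maxgen_le (by have := le_max_right (critOf d) c; omega)
    intro y hy
    simp only [List.mem_map] at hy
    obtain ⟨x, hxk, rfl⟩ := hy
    rw [getD_depthStep]
    split
    · exact le_max_right _ _
    · rename_i hxp
      have hxk' : x ∈ d.keys := ((keys_depthStep d p x).mp hxk).resolve_right hxp
      have h1 : d.getD x 0 ≤ critOf d :=
        maxgen_ge (l := d.keys.map (fun q => d.getD q 0)) (List.mem_map_of_mem hxk')
      exact le_trans h1 (le_max_left _ _)
  have hlo : max (critOf d) c ≤ critOf (depthStepFn d p) := max_le hA hcmem
  omega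

lemma depthFold_single (i0 : Int) (qs : List Int) :
    [(i0, qs)].foldl depthStepFn PySem.Dict.empty
      = PySem.Dict.ofList (qs.map (fun q => (q, (1 : Int)))) := by
  show depthStepFn PySem.Dict.empty (i0, qs) = _
  simp only [depthStepFn]
  have hz : pyMaxGen ((i0, qs).2.map (fun q => (PySem.Dict.empty : PySem.Dict Int Int).getD q 0)) = 0 := by
    apply le_antisymm
    · apply maxgen_le le_rfl
      intro x hx
      simp only [List.mem_map] at hx
      obtain ⟨q, _, rfl⟩ := hx
      simp [PySem.Dict.getD_empty]
    · cases qs with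
      | nil => simp [pyMaxGen, PySem.List.max?]
      | cons a t =>
        have : (PySem.Dict.empty : PySem.Dict Int Int).getD a 0
            ≤ pyMaxGen (((a :: t)).map (fun q => (PySem.Dict.empty : PySem.Dict Int Int).getD q 0)) :=
          maxgen_ge (List.mem_map_of_mem (List.mem_cons_self))
        simpa [PySem.Dict.getD_empty] using this
  rw [hz]
  simp only [PySem.Dict.ofList, PySem.Dict.update, List.foldl_map]
  norm_num

lemma crit0 (qs : List Int) (hqs : qs ≠ []) :
    critOf (PySem.Dict.ofList (qs.map (fun q => (q, (1 : Int))))) = 1 := by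
  set d0 := PySem.Dict.ofList (qs.map (fun q => (q, (1 : Int)))) with hd0
  have hkeys : d0.keys = PySem.Set.ofList qs := by
    show (PySem.Dict.empty.update (qs.map (fun q => (q, (1:Int))))).keys = _
    unfold PySem.Dict.update
    rw [List.foldl_map, PySem.Dict.keys_foldl_insert qs (fun _ _ => (1:Int))]
    rw [PySem.Dict.keys_empty, PySem.Set.update_nil_left]
  have hget : ∀ x ∈ qs, d0.getD x 0 = 1 := by
    intro x hx
    rw [PySem.Dict.getD_eq_get?_getD, hd0, get?_ofList_const, if_pos hx]
    rfl
  obtain ⟨q0, hq0⟩ := List.exists_mem_of_ne_nil _ hqs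
  apply le_antisymm
  · apply maxgen_le (by omega)
    intro y hy
    simp only [List.mem_map] at hy
    obtain ⟨x, hxk, rfl⟩ := hy
    rw [hkeys] at hxk
    rw [hget x ((PySem.Set.mem_ofList _ _).mp hxk)]
  · have hk : q0 ∈ d0.keys := by rw [hkeys]; exact (PySem.Set.mem_ofList _ _).mpr hq0
    have := maxgen_ge (l := d0.keys.map (fun q => d0.getD q 0)) (x := d0.getD q0 0)
      (List.mem_map_of_mem hk)
    rw [hget q0 hq0] at this
    exact this

lemma if_lt_eq_max (a b : Int) : (if a < b then b else a) = max a b := by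
  split <;> omega

lemma main_loop (i0 : Int) (L : List (Int × List Int)) :
    ∀ (dep : PySem.Dict Int (List Int)) (minid depth : PySem.Dict Int Int) (best : Int),
      dep.keys.Nodup →
      (L.map Prod.fst).Nodup →
      (∀ p ∈ L, p.1 = i0 ∨ p.1 ∉ dep.keys) →
      (∀ a ∈ dep.items, i0 ≤ a.1) →
      (∀ q, minid.get? q = minSpec dep.items q) →
      depth = dep.items.foldl depthStepFn PySem.Dict.empty →
      best = critOf depth →
      (∀ q, depth.contains q = true → 1 ≤ depth.getD q 0) →
      (L.foldl altInner (minid, depth, best)).2.2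
        = critOf ((L.foldl depStepFn dep).items.foldl depthStepFn PySem.Dict.empty) := by
  induction L with
  | nil =>
    intro dep minid depth best _ _ _ _ _ hdepth hbest _
    simp [hbest, hdepth]
  | cons p L ih =>
    intro dep minid depth best hnd hLnd hfresh hlb hm hdepth hbest hval
    rw [List.foldl_cons, List.foldl_cons]
    have hcond := cond_eq dep.items minid p hm
    by_cases hA : dep.items.any (fun added => pyDependsOn p added) = true
    · -- the gate is added on both sides
      -- facts from the condition
      obtain ⟨a, haG, hda⟩ := List.any_eq_true.mp hA
      obtain ⟨halt, q₁, hq₁, hqa⟩ := (pyDependsOn_iff p a).mp hda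
      have hi0lt : i0 < p.1 := lt_of_le_of_lt (hlb a haG) halt
      have hpne : p.2 ≠ [] := List.ne_nil_of_mem hq₁
      have hp1new : p.1 ∉ dep.keys := by
        rcases hfresh p List.mem_cons_self with h | h
        · exact (by omega : False).elim
        · exact h
      have hp1nc : dep.contains p.1 = false := by
        cases hcc : dep.contains p.1 with
        | false => rfl
        | true => exact absurd ((PySem.Dict.contains_iff_mem_keys _ _).mp hcc) hp1new
      have hitems : (dep.insert p.1 p.2).items = dep.items ++ [p] :=
        PySem.Dict.items_insert_of_not_contains dep p.2 hp1nc
      -- unfold one step of each side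
      rw [show depStepFn dep p = dep.insert p.1 p.2 from by unfold depStepFn; rw [if_pos hA]]
      have haltB : altInner (minid, depth, best) p
          = (p.2.foldl (fun d q => d.insert q (min (d.getD q p.1) p.1)) minid,
             p.2.foldl (fun d q => d.insert q
                (1 + (PySem.List.max? (p.2.map (fun q => depth.getD q 0)) (fun y => y)).getD 0)) depth,
             if best < 1 + (PySem.List.max? (p.2.map (fun q => depth.getD q 0)) (fun y => y)).getD 0
             then 1 + (PySem.List.max? (p.2.map (fun q => depth.getD q 0)) (fun y => y)).getD 0
             else best) := by
        simp only [altInner, hcond, hA, if_pos]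
        rw [PySem.List.foldl_prod_mk
          (f := fun d q => PySem.Dict.insert d q
            (1 + (PySem.List.max? (p.2.map (fun q => depth.getD q 0)) (fun y => y)).getD 0))
          (g := fun d q => PySem.Dict.insert d q (min (d.getD q p.1) p.1))]
      rw [haltB]
      set c : Int := 1 + (PySem.List.max? (p.2.map (fun q => depth.getD q 0)) (fun y => y)).getD 0 with hcdef
      have hcpy : c = 1 + pyMaxGen (p.2.map (fun q => depth.getD q 0)) := rfl
      -- apply the induction hypothesis to the new state
      apply ih (dep.insert p.1 p.2)
      · exact PySem.Dict.nodup_keys_insert dep p.1 p.2 hnd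
      · exact (List.nodup_cons.mp hLnd).2
      · intro p' hp'
        rcases hfresh p' (List.mem_cons_of_mem _ hp') with h | h
        · exact Or.inl h
        · right
          rw [PySem.Dict.mem_keys_insert]
          rintro (h1 | h2)
          · exact (List.nodup_cons.mp hLnd).1 (h1 ▸ List.mem_map_of_mem hp')
          · exact h h2
      · intro a' ha'
        rw [hitems] at ha'
        rcases List.mem_append.mp ha' with h | h
        · exact hlb a' h
        · simp only [List.mem_singleton] at h
          subst h; omega
      · -- min_id invariant
        intro q
        rw [get?_fim, hitems, minSpec_append, hm q]
      · -- depth invariant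
        have hdB : List.foldl (fun d q => d.insert q c) depth p.2 = depthStepFn depth p := by
          simp only [depthStepFn, pyMaxGen]
          rw [hcdef]
        rw [hdB, hitems, List.foldl_append, ← hdepth]
        simp only [List.foldl_cons, List.foldl_nil]
      · -- best invariant
        have hdB : List.foldl (fun d q => d.insert q c) depth p.2 = depthStepFn depth p := by
          simp only [depthStepFn, pyMaxGen]
          rw [hcdef]
        rw [hdB, critOf_depthStep depth p hpne hval, if_lt_eq_max, hbest, hcpy]
      · -- values ≥ 1
        have hc1 : 1 ≤ c := by
          have h1 : depth.getD q₁ 0 ≤ pyMaxGen (p.2.map (fun q => depth.getD q 0)) :=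
            maxgen_ge (List.mem_map_of_mem hq₁)
          have := getD0_nonneg depth hval q₁
          rw [hcpy]
          omega
        intro q hq
        rw [getD_fic]
        rcases (contains_fic_iff _ _ _ _).mp hq with hk | hp2
        · have hcq : depth.contains q = true := (PySem.Dict.contains_iff_mem_keys _ _).mpr hk
          split
          · exact hc1
          · exact hval q hcq
        · rw [if_pos hp2]
          exact hc1
    · -- not added on either side
      rw [show depStepFn dep p = dep from by unfold depStepFn; rw [if_neg hA]]
      rw [show altInner (minid, depth, best) p = (minid, depth, best) from by
        simp only [altInner, hcond]
        rw [if_neg hA]]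
      apply ih dep minid depth best hnd (List.nodup_cons.mp hLnd).2
        (fun p' hp' => hfresh p' (List.mem_cons_of_mem _ hp')) hlb hm hdepth hbest hval

lemma per_gate (i0 : Int) (qs : List Int) (hqs : qs ≠ []) (rem : List (Int × List Int)) :
    (((PySem.Dict.ofList rem).items).foldl altInner
        (PySem.Dict.ofList (qs.map (fun q => (q, i0))),
         PySem.Dict.ofList (qs.map (fun q => (q, (1 : Int)))), 1)).2.2
      = critOf (pyGetDepthByQubit (pyGetDependentGates (i0, qs) (PySem.Dict.ofList rem))) := by
  unfold pyGetDepthByQubit pyGetDependentGates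
  have hnc : (PySem.Dict.empty : PySem.Dict Int (List Int)).contains i0 = false :=
    PySem.Dict.contains_empty _
  have hitems0 : ((PySem.Dict.empty : PySem.Dict Int (List Int)).insert i0 qs).items
      = [(i0, qs)] := by
    rw [PySem.Dict.items_insert_of_not_contains _ _ hnc]; rfl
  have hkeys0 : ((PySem.Dict.empty : PySem.Dict Int (List Int)).insert i0 qs).keys = [i0] := by
    rw [PySem.Dict.keys_insert_of_not_contains _ _ hnc, PySem.Dict.keys_empty]; rfl
  apply main_loop i0
  · rw [hkeys0]; simp
  · have := PySem.Dict.nodup_keys_ofList rem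
    simpa only [PySem.Dict.keys] using this
  · intro p _
    by_cases h : p.1 = i0
    · exact Or.inl h
    · right; rw [hkeys0]; simp [h]
  · intro a ha
    rw [hitems0] at ha
    simp only [List.mem_singleton] at ha
    subst ha; exact le_refl _
  · intro q
    rw [get?_ofList_const, hitems0, minSpec_single]
  · rw [hitems0, depthFold_single]
  · exact (crit0 qs hqs).symm
  · intro q hq
    rw [PySem.Dict.getD_eq_get?_getD, get?_ofList_const]
    by_cases h : q ∈ qs
    · rw [if_pos h]; rfl
    · exfalso
      rw [PySem.Dict.contains_eq_isSome_get?, get?_ofList_const, if_neg h] at hq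
      simp at hq

lemma outer_fold (rem : List (Int × List Int)) :
    ∀ (step : List (Int × List Int × List Int)), (∀ g ∈ step, g.2.1 ≠ []) → ∀ (acc : Int),
      step.foldl (fun paths g =>
        let dependent := pyGetDependentGates (g.1, g.2.1) (PySem.Dict.ofList rem)
        let depths := pyGetDepthByQubit dependent
        let critPath := pyMaxGen (depths.keys.map (fun q => depths.getD q 0))
        paths + (1 + critPath)) acc
      = step.foldl (fun total g =>
        let s := ((PySem.Dict.ofList rem).items).foldl altInner
          (PySem.Dict.ofList (g.2.1.map (fun q => (q, g.1))),
           PySem.Dict.ofList (g.2.1.map (fun q => (q, (1 : Int)))), 1)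
        total + (1 + s.2.2)) acc := by
  intro step
  induction step with
  | nil => intro _ _; rfl
  | cons g t ih =>
    intro hpre acc
    rw [List.foldl_cons, List.foldl_cons]
    have hg := per_gate g.1 g.2.1 (hpre g List.mem_cons_self) rem
    rw [ih (fun g' h => hpre g' (List.mem_cons_of_mem _ h))]
    simp only
    rw [hg]
    rfl

-- ===== VERDICT (by name: the statement is the Claim_ definition above) =====
theorem criticality_spec : Claim_equal_criticality := by
  intro step remaining_gates crit_dict _ hpre
  unfold Spec_criticality
  simp only [criticality, criticality_alt]
  exact outer_fold remaining_gates step hpre 0
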